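-- pv_equiv track=rewrite | github.com/jsiirola/pyomo | pyomo/core/expr/relational_expr.py | _compute_polynomial_degree
-- ===== SOURCE A (Python) =====
-- def _compute_polynomial_degree(result):
--     # NB: We can't use max() here because None (non-polynomial)
--     # overrides a numeric value (and max() just ignores it)
--     ans = 0
--     for x in result:
--         if x is None:
--             return None
--         elif ans < x:
--             ans = x
--     return ans
-- ===== SOURCE B (Python) =====
-- def _compute_polynomial_degree(result):
--     # Divide and conquer: combine halves with a None-absorbing max.
--     def merge(lo, hi):
--         if hi <= lo:
--             return 0
--         if hi - lo == 1:
--             return result[lo]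
--         mid = (lo + hi) // 2
--         a = merge(lo, mid)
--         b = merge(mid, hi)
--         if a is None or b is None:
--             return None
--         return a if a > b else b
--     deg = merge(0, len(result))
--     if deg is None:
--         return None
--     return deg if deg > 0 else 0
-- ===== Notes on version B (the rewrite author's own statement) =====
-- stated objective: alternative
-- what changed: Replaces A's left-to-right accumulator loop with early return by a divide-and-conquer recursion that splits the list in halves and combines results with a None-absorbing max, flooring at 0 once at the end.
import Mathlib
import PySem

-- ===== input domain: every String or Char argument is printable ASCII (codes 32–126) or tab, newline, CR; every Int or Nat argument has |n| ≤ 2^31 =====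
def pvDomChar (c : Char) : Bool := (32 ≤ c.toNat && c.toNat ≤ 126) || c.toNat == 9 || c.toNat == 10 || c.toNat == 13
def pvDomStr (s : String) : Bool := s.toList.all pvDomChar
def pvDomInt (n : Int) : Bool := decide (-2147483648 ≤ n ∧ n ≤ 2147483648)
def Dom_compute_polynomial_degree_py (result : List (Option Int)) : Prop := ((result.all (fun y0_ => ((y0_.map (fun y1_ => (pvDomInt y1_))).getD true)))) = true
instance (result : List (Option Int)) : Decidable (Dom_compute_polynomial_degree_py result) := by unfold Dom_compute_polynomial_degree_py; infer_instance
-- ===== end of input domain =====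

-- B is an alternative divide-and-conquer formulation of the same computation; no speed claim.

-- ===== PORT A =====
-- A's loop: early-return None on a None element, otherwise keep the running max (starting at 0)
def cpdLoopA (ans : Int) : List (Option Int) → Option Int
  | [] => some ans
  | none :: _ => none
  | some x :: t => cpdLoopA (if ans < x then x else ans) t

def compute_polynomial_degree_py (result : List (Option Int)) : Option Int :=
  cpdLoopA 0 result

-- ===== PORT B =====
-- merge(lo, hi) of Source B: divide and conquer over the index range [lo, hi);
-- `result[lo]` is only reached with lo < result.length, so `getD lo none` reads it exactly
def cpdMerge (result : List (Option Int)) (lo hi : Nat) : Option Int :=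
  if hi ≤ lo then some 0
  else if hi - lo = 1 then result.getD lo none
  else
    match cpdMerge result lo ((lo + hi) / 2), cpdMerge result ((lo + hi) / 2) hi with
    | some a, some b => some (if a > b then a else b)
    | _, _ => none
termination_by hi - lo
decreasing_by all_goals omega

def compute_polynomial_degree_py_alt (result : List (Option Int)) : Option Int :=
  match cpdMerge result 0 result.length with
  | none => none
  | some deg => some (if deg > 0 then deg else 0)

-- ===== PRECONDITION & SPEC =====
def Spec_compute_polynomial_degree_py (result : List (Option Int)) (out : Option Int) : Prop := out = compute_polynomial_degree_py_alt result
instance (result : List (Option Int)) (out : Option Int) : Decidable (Spec_compute_polynomial_degree_py result out) := by unfold Spec_compute_polynomial_degree_py; infer_instance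

-- ===== CLAIM (what is proved, stated in full; the proofs are below) =====
def Claim_equal_compute_polynomial_degree_py : Prop := ∀ (result : List (Option Int)), Dom_compute_polynomial_degree_py result → Spec_compute_polynomial_degree_py result (compute_polynomial_degree_py result)

-- ===== LEMMAS AND PROOFS =====

-- the None-absorbing max that Source B's merge uses to combine halves
def cpdG (a b : Option Int) : Option Int :=
  match a, b with
  | some a, some b => some (if a > b then a else b)
  | _, _ => none

-- value of merge on a slice, as a fold of cpdG
def cpdF : List (Option Int) → Option Int
  | [] => some 0
  | x :: t => t.foldl cpdG x

lemma cpdG_assoc (a b c : Option Int) : cpdG (cpdG a b) c = cpdG a (cpdG b c) := by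
  cases a <;> cases b <;> cases c <;> (simp [cpdG]; try (split_ifs <;> omega))

lemma foldl_cpdG_assoc (t : List (Option Int)) (x y : Option Int) :
    t.foldl cpdG (cpdG x y) = cpdG x (t.foldl cpdG y) := by
  induction t generalizing y with
  | nil => rfl
  | cons a t ih => simp only [List.foldl, cpdG_assoc]; exact ih _

lemma cpdF_append (s1 s2 : List (Option Int)) (h1 : s1 ≠ []) (h2 : s2 ≠ []) :
    cpdF (s1 ++ s2) = cpdG (cpdF s1) (cpdF s2) := by
  cases s1 with
  | nil => exact absurd rfl h1
  | cons x t1 =>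
    cases s2 with
    | nil => exact absurd rfl h2
    | cons y t2 =>
      simp only [cpdF, List.cons_append, List.foldl_append, List.foldl]
      rw [← foldl_cpdG_assoc t2 (t1.foldl cpdG x) y]

lemma cpdMerge_eq_aux (result : List (Option Int)) :
    ∀ n, ∀ lo hi : Nat, hi - lo = n → lo < hi → hi ≤ result.length →
      cpdMerge result lo hi = cpdF ((result.drop lo).take (hi - lo)) := by
  intro n
  induction n using Nat.strong_induction_on with
  | _ n ih =>
    intro lo hi hn hlt hle
    rw [cpdMerge, if_neg (by omega)]
    by_cases h1 : hi - lo = 1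
    · rw [if_pos h1, h1]
      have hlo : lo < result.length := by omega
      have hdrop : result.drop lo = result[lo] :: result.drop (lo + 1) :=
        (List.getElem_cons_drop hlo).symm
      have htake : (result.drop lo).take 1 = [result[lo]] := by rw [hdrop]; rfl
      rw [htake]
      simp [cpdF, List.getD, List.getElem?_eq_getElem hlo]
    · rw [if_neg h1]
      set mid := (lo + hi) / 2 with hmid
      have hm1 : lo < mid := by omega
      have hm2 : mid < hi := by omega
      rw [ih (mid - lo) (by omega) lo mid rfl hm1 (by omega),
          ih (hi - mid) (by omega) mid hi rfl hm2 hle]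
      have hsplit : (result.drop lo).take (hi - lo)
          = (result.drop lo).take (mid - lo) ++ ((result.drop mid).take (hi - mid)) := by
        have hh : hi - lo = (mid - lo) + (hi - mid) := by omega
        rw [hh, List.take_add, List.drop_drop]
        congr 3
        omega
      rw [hsplit, cpdF_append]
      · cases ha : cpdF ((result.drop lo).take (mid - lo)) <;>
          cases hb : cpdF ((result.drop mid).take (hi - mid)) <;> simp [cpdG]
      · have hlen : ((result.drop lo).take (mid - lo)).length = min (mid - lo) (result.length - lo) := by
          simp
        intro hnil
        rw [hnil] at hlen
        simp at hlen
        omega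
      · have hlen : ((result.drop mid).take (hi - mid)).length = min (hi - mid) (result.length - mid) := by
          simp
        intro hnil
        rw [hnil] at hlen
        simp at hlen
        omega

lemma cpdMerge_eq (result : List (Option Int)) (lo hi : Nat)
    (hlt : lo < hi) (hle : hi ≤ result.length) :
    cpdMerge result lo hi = cpdF ((result.drop lo).take (hi - lo)) :=
  cpdMerge_eq_aux result (hi - lo) lo hi rfl hlt hle

-- cpdF is none exactly when a None lies in the slice; otherwise it is the running max of the values
lemma foldl_cpdG_none (t : List (Option Int)) (x : Option Int)
    (h : x = none ∨ none ∈ t) : t.foldl cpdG x = none := by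
  induction t generalizing x with
  | nil => simpa using h
  | cons a t ih =>
    simp only [List.foldl]
    apply ih
    rcases h with h0 | h1
    · subst h0; left; cases a <;> rfl
    · rcases List.mem_cons.mp h1 with h2 | h3
      · left; rw [← h2]; cases x <;> rfl
      · right; exact h3

lemma cpdF_cons_none (x : Option Int) (t : List (Option Int)) (h : none ∈ x :: t) :
    cpdF (x :: t) = none := by
  simp only [cpdF]
  exact foldl_cpdG_none t x (by simpa [eq_comm] using List.mem_cons.mp h)

lemma cpdF_cons_some (x : Option Int) (t : List (Option Int)) (h : none ∉ x :: t) :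
    cpdF (x :: t) = some ((t.map (fun o => o.getD 0)).foldl max (x.getD 0)) := by
  simp only [cpdF]
  induction t generalizing x with
  | nil =>
    cases x with
    | none => simp at h
    | some v => simp
  | cons a t ih =>
    cases x with
    | none => simp at h
    | some v =>
      cases a with
      | none => simp at h
      | some w =>
        simp only [List.foldl, List.map, cpdG]
        have hnt : none ∉ some (if v > w then v else w) :: t := by
          intro hm
          rcases List.mem_cons.mp hm with h0 | h1
          · simp at h0
          · exact h (List.mem_cons_of_mem _ (List.mem_cons_of_mem _ h1))
        rw [ih (some (if v > w then v else w)) hnt]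
        congr 2
        simp only [Option.getD]
        split_ifs <;> omega

-- A's loop, characterised
lemma cpdLoopA_none (ans : Int) (l : List (Option Int)) (h : none ∈ l) :
    cpdLoopA ans l = none := by
  induction l generalizing ans with
  | nil => simp at h
  | cons x t ih =>
    cases x with
    | none => rfl
    | some v =>
      have ht : none ∈ t := by simpa using h
      simpa only [cpdLoopA] using ih _ ht

lemma cpdLoopA_some (ans : Int) (l : List (Option Int)) (h : none ∉ l) :
    cpdLoopA ans l = some ((l.map (fun o => o.getD 0)).foldl max ans) := by
  induction l generalizing ans with
  | nil => rfl
  | cons x t ih =>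
    cases x with
    | none => simp at h
    | some v =>
      have ht : none ∉ t := by simp at h; exact h
      simp only [cpdLoopA, List.map, List.foldl]
      rw [ih _ ht]
      congr 1
      by_cases hc : ans < v
      · simp [hc, max_eq_right hc.le]
      · simp [hc, max_eq_left (not_lt.mp hc)]

lemma foldl_max_floor (h : Int) (t : List Int) :
    (h :: t).foldl max 0 = max 0 (t.foldl max h) := by
  simp only [List.foldl]
  induction t generalizing h with
  | nil => simp
  | cons a t ih =>
    simp only [List.foldl]
    rw [show max (max 0 h) a = max 0 (max h a) from by ac_rfl, ih]

-- ===== VERDICT (by name: the statement is the Claim_ definition above) =====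
theorem compute_polynomial_degree_py_spec : Claim_equal_compute_polynomial_degree_py := by
  intro result _
  unfold Spec_compute_polynomial_degree_py compute_polynomial_degree_py compute_polynomial_degree_py_alt
  cases hres : result with
  | nil => rw [cpdMerge]; rfl
  | cons x t =>
    rw [← hres]
    have hne : result ≠ [] := by rw [hres]; exact List.cons_ne_nil _ _
    have hlt : 0 < result.length := List.length_pos_iff.mpr hne
    rw [cpdMerge_eq result 0 result.length hlt le_rfl]
    simp only [List.drop_zero, Nat.sub_zero, List.take_length]
    rw [hres]
    by_cases h : none ∈ x :: t
    · rw [cpdLoopA_none 0 _ h, cpdF_cons_none x t h]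
    · rw [cpdLoopA_some 0 _ h, cpdF_cons_some x t h]
      have hm : (x :: t).map (fun o => o.getD 0) = x.getD 0 :: t.map (fun o => o.getD 0) := rfl
      rw [hm, foldl_max_floor]
      rcases le_or_gt ((t.map (fun o => o.getD 0)).foldl max (x.getD 0)) 0 with hle | hgt
      · simp [max_eq_left hle, not_lt.mpr hle]
      · simp [max_eq_right hgt.le, hgt]
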